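-- pv_equiv track=rewrite | github.com/newsonjacob/ReactiveOptical_Flow | analysis/flight_review.py | _repeated_state_runs
-- ===== SOURCE A (Python) =====
-- from typing import Dict, Any, List, Sequence
--
-- def _repeated_state_runs(states: Sequence[str]) -> Dict[str, int]:
--     """Return longest consecutive run length for each state."""
--     runs: Dict[str, int] = {}
--     if not states:
--         return runs
--     prev = states[0]
--     count = 1
--     for state in states[1:]:
--         if state == prev:
--             count += 1
--         else:
--             if count > 1:
--                 runs[prev] = max(runs.get(prev, 0), count)
--             prev = state
--             count = 1
--     if count > 1:
--         runs[prev] = max(runs.get(prev, 0), count)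
--     return runs
-- ===== SOURCE B (Python) =====
-- from typing import Dict, Sequence
--
-- def _repeated_state_runs(states: Sequence[str]) -> Dict[str, int]:
--     """Return longest consecutive run length for each state."""
--     n = len(states)
--     # Phase 1: boundary indices — positions where the state changes.
--     cuts = [0] + [i + 1 for i, (x, y) in enumerate(zip(states, states[1:])) if x != y] + [n]
--     # Phase 2: run lengths are differences of consecutive boundaries.
--     pairs = [(states[a], b - a) for a, b in zip(cuts, cuts[1:]) if b - a > 1]
--     # Phase 3: keep the longest qualifying run per state (first-qualifying-run order).
--     runs: Dict[str, int] = {}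
--     for k, l in pairs:
--         if k not in runs or l > runs[k]:
--             runs[k] = l
--     return runs
-- ===== Notes on version B (the rewrite author's own statement) =====
-- stated objective: alternative
-- what changed: Replaced A's single-pass prev/count state machine (with its duplicated post-loop flush) by a three-phase boundary-index pipeline: collect the indices where adjacent states differ, read each run's length off as the difference of consecutive boundary indices, then keep the longest qualifying (length > 1) run per state with a conditional dict update.
import Mathlib
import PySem

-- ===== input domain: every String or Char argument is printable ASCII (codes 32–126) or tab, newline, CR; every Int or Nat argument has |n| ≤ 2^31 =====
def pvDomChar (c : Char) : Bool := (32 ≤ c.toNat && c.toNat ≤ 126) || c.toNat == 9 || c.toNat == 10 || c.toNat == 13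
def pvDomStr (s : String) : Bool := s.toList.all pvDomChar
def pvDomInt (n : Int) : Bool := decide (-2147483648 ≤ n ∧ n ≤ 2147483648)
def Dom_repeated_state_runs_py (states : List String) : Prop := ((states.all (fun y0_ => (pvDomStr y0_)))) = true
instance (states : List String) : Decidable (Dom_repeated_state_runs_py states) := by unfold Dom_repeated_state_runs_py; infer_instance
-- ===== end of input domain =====

-- B replaces A's prev/count state machine by a three-phase boundary-index pipeline (change
-- positions via enumerate/zip, run lengths as differences of consecutive boundaries, then a
-- conditional max-update per qualifying run): an alternative decomposition, same O(n) cost.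


-- ===== PORT A =====
-- loop body of A's for-loop (state = (runs, prev, count))
def pvStepA (acc : PySem.Dict String Int × String × Int) (state : String) :
    PySem.Dict String Int × String × Int :=
  if state == acc.2.1 then (acc.1, acc.2.1, acc.2.2 + 1)
  else (if acc.2.2 > 1 then acc.1.insert acc.2.1 (max (acc.1.getD acc.2.1 0) acc.2.2) else acc.1,
        state, 1)

def repeated_state_runs_py (states : List String) : List (String × Int) :=
  match states with
  | [] => (PySem.Dict.empty : PySem.Dict String Int).items
  | s0 :: rest =>
    let acc := rest.foldl pvStepA (PySem.Dict.empty, s0, 1)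
    (if acc.2.2 > 1 then acc.1.insert acc.2.1 (max (acc.1.getD acc.2.1 0) acc.2.2) else acc.1).items

-- ===== PORT B =====
-- Phase 1: boundary indices — [0] + [i+1 for i,(x,y) in enumerate(zip(states, states[1:])) if x != y] + [n]
def pvCutsB (states : List String) : List Int :=
  (0 : Int) ::
    (((PySem.List.enumerate (states.zip (PySem.List.slice states (some 1) none)) 0).filter
        (fun p => p.2.1 != p.2.2)).map (fun p => p.1 + 1))
    ++ [(states.length : Int)]

-- Phase 2: [(states[a], b-a) for a,b in zip(cuts, cuts[1:]) if b-a > 1]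
-- (a surviving index a is always a valid run start, so pyGetD's default "" is never used)
def pvPairsB (states : List String) : List (String × Int) :=
  (((pvCutsB states).zip (PySem.List.slice (pvCutsB states) (some 1) none)).filter
      (fun ab => decide (ab.2 - ab.1 > 1))).map
    (fun ab => (PySem.List.pyGetD states ab.1 "", ab.2 - ab.1))

-- Phase 3 loop body: 'if k not in runs or l > runs[k]: runs[k] = l'
def pvStepB (runs : PySem.Dict String Int) (kl : String × Int) : PySem.Dict String Int :=
  match runs.get? kl.1 with
  | none => runs.insert kl.1 kl.2
  | some v => if v < kl.2 then runs.insert kl.1 kl.2 else runs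

def repeated_state_runs_py_alt (states : List String) : List (String × Int) :=
  ((pvPairsB states).foldl pvStepB PySem.Dict.empty).items

-- ===== PRECONDITION & SPEC =====
def Spec_repeated_state_runs_py (states : List String) (out : List (String × Int)) : Prop := out = repeated_state_runs_py_alt states
instance (states : List String) (out : List (String × Int)) : Decidable (Spec_repeated_state_runs_py states out) := by unfold Spec_repeated_state_runs_py; infer_instance

-- ===== CLAIM (what is proved, stated in full; the proofs are below) =====
def Claim_equal_repeated_state_runs_py : Prop := ∀ (states : List String), Dom_repeated_state_runs_py states → Spec_repeated_state_runs_py states (repeated_state_runs_py states)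

-- ===== LEMMAS AND PROOFS =====

-- proof-side: the runs of consecutive equal states, as (key, length) pairs
def pvGroupAcc (prev : String) (count : Int) : List String → List (String × Int)
  | [] => [(prev, count)]
  | y :: ys => if y == prev then pvGroupAcc prev (count + 1) ys
               else (prev, count) :: pvGroupAcc y 1 ys

-- A's aggregation step rephrased on (key, length) pairs
def pvStepMax (runs : PySem.Dict String Int) (kl : String × Int) : PySem.Dict String Int :=
  if kl.2 > 1 then runs.insert kl.1 (max (runs.getD kl.1 0) kl.2) else runs

-- proof-side: boundary positions of a pair list, starting at index s
def pvMseq : List (String × String) → Int → List Int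
  | [], _ => []
  | ab :: r, s => (if ab.1 = ab.2 then ([] : List Int) else [s + 1]) ++ pvMseq r (s + 1)

def pvCutsSpec (states : List String) : List Int :=
  0 :: pvMseq (states.zip states.tail) 0 ++ [(states.length : Int)]

def pvPairsAll (states : List String) : List (String × Int) :=
  ((pvCutsSpec states).zip (pvCutsSpec states).tail).map
    (fun ab => (PySem.List.pyGetD states ab.1 "", ab.2 - ab.1))

def pvFlattenG (gs : List (String × Int)) : List String :=
  gs.flatMap (fun kl => List.replicate kl.2.toNat kl.1)

-- A's loop followed by its final flush equals a fold of pvStepMax over the remaining groups.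
lemma loopA_eq_groups (rest : List String) :
    ∀ (runs : PySem.Dict String Int) (prev : String) (count : Int),
      (let acc := rest.foldl pvStepA (runs, prev, count)
       if acc.2.2 > 1 then acc.1.insert acc.2.1 (max (acc.1.getD acc.2.1 0) acc.2.2) else acc.1)
      = (pvGroupAcc prev count rest).foldl pvStepMax runs := by
  induction rest with
  | nil =>
      intro runs prev count
      simp [pvGroupAcc, pvStepMax]
  | cons y ys ih =>
      intro runs prev count
      by_cases h : y == prev
      · simp only [List.foldl_cons, pvGroupAcc, pvStepA, h, if_pos]
        exact ih runs prev (count + 1)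
      · simp only [List.foldl_cons, pvGroupAcc, pvStepA, h, if_neg, Bool.false_eq_true,
          not_false_iff, List.foldl_cons]
        have := ih (if count > 1 then runs.insert prev (max (runs.getD prev 0) count) else runs) y 1
        simpa [pvStepMax] using this

-- bridge: the enumerate/filter/map comprehension is pvMseq
lemma mseq_bridge : ∀ (pl : List (String × String)) (s : Int),
    ((PySem.List.enumerate pl s).filter (fun p => p.2.1 != p.2.2)).map (fun p => p.1 + 1)
      = pvMseq pl s := by
  intro pl
  induction pl with
  | nil => intro s; simp [pvMseq, PySem.List.enumerate_nil]
  | cons ab r ih =>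
      intro s
      by_cases h : ab.1 = ab.2
      · simp [PySem.List.enumerate_cons, pvMseq, h, ih]
      · simp [PySem.List.enumerate_cons, pvMseq, h, ih]

lemma cutsB_eq (states : List String) : pvCutsB states = pvCutsSpec states := by
  simp [pvCutsB, pvCutsSpec, PySem.List.slice_from_one, mseq_bridge]

lemma mseq_shift : ∀ (pl : List (String × String)) (s c : Int),
    pvMseq pl (c + s) = (pvMseq pl s).map (· + c) := by
  intro pl
  induction pl with
  | nil => intro s c; simp [pvMseq]
  | cons ab r ih =>
      intro s c
      have h1 : c + s + 1 = c + (s + 1) := by ring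
      by_cases h : ab.1 = ab.2
      · rw [pvMseq, pvMseq, if_pos h, if_pos h, h1, ih (s + 1) c]
        simp
      · rw [pvMseq, pvMseq, if_neg h, if_neg h, h1, ih (s + 1) c]
        simp only [List.map_cons, List.cons_append]
        congr 1
        ring

lemma mseq_all_eq : ∀ (pl : List (String × String)) (s : Int),
    (∀ ab ∈ pl, ab.1 = ab.2) → pvMseq pl s = [] := by
  intro pl
  induction pl with
  | nil => intro s _; rfl
  | cons ab r ih =>
      intro s h
      have hab := h ab (by simp)
      simp [pvMseq, hab, ih (s + 1) (fun x hx => h x (by simp [hx]))]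

lemma mseq_ge : ∀ (pl : List (String × String)) (s : Int), ∀ x ∈ pvMseq pl s, s + 1 ≤ x := by
  intro pl
  induction pl with
  | nil => intro s x hx; simp [pvMseq] at hx
  | cons ab r ih =>
      intro s x hx
      simp only [pvMseq, List.mem_append] at hx
      rcases hx with hx | hx
      · by_cases h : ab.1 = ab.2
        · simp [h] at hx
        · simp [h] at hx; omega
      · have := ih (s + 1) x hx; omega

lemma cutsSpec_nonneg (states : List String) : ∀ x ∈ pvCutsSpec states, 0 ≤ x := by
  intro x hx
  simp only [pvCutsSpec, List.cons_append, List.mem_cons, List.mem_append] at hx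
  rcases hx with h | h | h
  · omega
  · have := mseq_ge (states.zip states.tail) 0 x h; omega
  · rcases h with h | h
    · subst h; positivity
    · simp at h

lemma zp_replicate_all_eq (n : Nat) (k : String) :
    ∀ ab ∈ (List.replicate n k).zip (List.replicate n k).tail, ab.1 = ab.2 := by
  intro ab hab
  rcases ab with ⟨a, b⟩
  have h := List.of_mem_zip hab
  have h1 : a = k := List.eq_of_mem_replicate h.1
  have h2 : b = k := List.eq_of_mem_replicate (List.mem_of_mem_tail h.2)
  simp [h1, h2]

lemma mseq_replicate_append : ∀ (n : Nat), 1 ≤ n → ∀ (k r0 : String) (rr : List String) (s : Int),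
    k ≠ r0 →
    pvMseq ((List.replicate n k ++ r0 :: rr).zip (List.replicate n k ++ r0 :: rr).tail) s
      = (s + n) :: pvMseq ((r0 :: rr).zip rr) (s + n) := by
  intro n
  induction n with
  | zero => omega
  | succ m ih =>
      intro _ k r0 rr s hne
      cases m with
      | zero =>
          simp [List.replicate_one, pvMseq, hne]
      | succ m' =>
          have hT : List.replicate (m' + 1 + 1) k ++ r0 :: rr
              = k :: k :: (List.replicate m' k ++ r0 :: rr) := by
            simp [List.replicate_succ]
          rw [hT, List.tail_cons, List.zip_cons_cons]
          have hT2 : (k :: (List.replicate m' k ++ r0 :: rr))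
              = List.replicate (m' + 1) k ++ r0 :: rr := by
            simp [List.replicate_succ]
          rw [hT2]
          have hT3 : (List.replicate m' k ++ r0 :: rr)
              = (List.replicate (m' + 1) k ++ r0 :: rr).tail := by
            simp [List.replicate_succ]
          rw [hT3, pvMseq, ih (by omega) k r0 rr (s + 1) hne]
          have h1 : s + 1 + ((m' + 1 : Nat) : Int) = s + ((m' + 1 + 1 : Nat) : Int) := by
            push_cast; ring
          rw [h1]
          simp

lemma pyGetD_shift (n : Nat) (k : String) (rest : List String) (a : Int) (d : String)
    (ha : 0 ≤ a) :
    PySem.List.pyGetD (List.replicate n k ++ rest) (a + n) d = PySem.List.pyGetD rest a d := by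
  rw [PySem.List.pyGetD_of_nonneg _ _ (by omega), PySem.List.pyGetD_of_nonneg _ _ ha]
  have hs : (a + n).toNat = a.toNat + n := by omega
  rw [hs, List.getD_eq_getElem?_getD, List.getD_eq_getElem?_getD,
    List.getElem?_append_right (by rw [List.length_replicate]; omega)]
  simp

lemma flatten_groupAcc : ∀ (xs : List String) (p : String) (c : Int), 0 ≤ c →
    pvFlattenG (pvGroupAcc p c xs) = List.replicate c.toNat p ++ xs := by
  intro xs
  induction xs with
  | nil => intro p c _; simp [pvGroupAcc, pvFlattenG]
  | cons y ys ih =>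
      intro p c hc
      by_cases h : y == p
      · have hy : y = p := by simpa using h
        simp only [pvGroupAcc, h, if_pos]
        rw [ih p (c + 1) (by omega)]
        have h1 : (c + 1).toNat = c.toNat + 1 := by omega
        rw [h1, List.replicate_succ']
        simp [hy]
      · simp only [pvGroupAcc, h, Bool.false_eq_true, if_neg, not_false_iff]
        show pvFlattenG ((p, c) :: pvGroupAcc y 1 ys) = _
        have : pvFlattenG ((p, c) :: pvGroupAcc y 1 ys)
            = List.replicate c.toNat p ++ pvFlattenG (pvGroupAcc y 1 ys) := by
          simp [pvFlattenG]
        rw [this, ih y 1 (by omega)]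
        simp

lemma counts_groupAcc : ∀ (xs : List String) (p : String) (c : Int), 1 ≤ c →
    ∀ kl ∈ pvGroupAcc p c xs, 1 ≤ kl.2 := by
  intro xs
  induction xs with
  | nil => intro p c hc kl hkl; simp [pvGroupAcc] at hkl; subst hkl; exact hc
  | cons y ys ih =>
      intro p c hc kl hkl
      by_cases h : y == p
      · simp only [pvGroupAcc, h, if_pos] at hkl
        exact ih p (c + 1) (by omega) kl hkl
      · simp only [pvGroupAcc, h, Bool.false_eq_true, if_neg, not_false_iff,
          List.mem_cons] at hkl
        rcases hkl with hkl | hkl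
        · subst hkl; exact hc
        · exact ih y 1 le_rfl kl hkl

lemma head_groupAcc : ∀ (xs : List String) (p : String) (c : Int),
    ∃ c' t, pvGroupAcc p c xs = (p, c') :: t := by
  intro xs
  induction xs with
  | nil => intro p c; exact ⟨c, [], rfl⟩
  | cons y ys ih =>
      intro p c
      by_cases h : y == p
      · simp only [pvGroupAcc, h, if_pos]; exact ih p (c + 1)
      · simp only [pvGroupAcc, h, Bool.false_eq_true, if_neg, not_false_iff]
        exact ⟨c, pvGroupAcc y 1 ys, rfl⟩

lemma chain_groupAcc : ∀ (xs : List String) (p : String) (c : Int),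
    List.IsChain (fun a b => a.1 ≠ b.1) (pvGroupAcc p c xs) := by
  intro xs
  induction xs with
  | nil => intro p c; simp [pvGroupAcc, List.isChain_cons]
  | cons y ys ih =>
      intro p c
      by_cases h : y == p
      · simp only [pvGroupAcc, h, if_pos]; exact ih p (c + 1)
      · have hy : y ≠ p := by simpa using h
        simp only [pvGroupAcc, h, Bool.false_eq_true, if_neg, not_false_iff]
        obtain ⟨c', t, ht⟩ := head_groupAcc ys y 1
        rw [ht]
        refine List.isChain_cons.mpr ⟨?_, ht ▸ ih y 1⟩
        intro z hz
        simp at hz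
        subst hz
        simpa using hy.symm

-- inserting the value a key already holds does not change a dict with unique keys
lemma dict_insert_self {d : PySem.Dict String Int} {k : String} {v : Int}
    (hnd : d.keys.Nodup) (h : d.get? k = some v) : d.insert k v = d := by
  apply PySem.Dict.ext
  rw [PySem.Dict.items_insert_of_contains d v
    (by rw [PySem.Dict.contains_eq_isSome_get?, h]; rfl)]
  conv_rhs => rw [← List.map_id d.items]
  apply List.map_congr_left
  rintro ⟨p1, p2⟩ hp
  by_cases hpk : p1 == k
  · have hp1 : p1 = k := by simpa using hpk
    subst hp1
    have := PySem.Dict.get?_of_mem_items d hp hnd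
    rw [h] at this
    have hv : v = p2 := by injection this
    subst hv
    simp
  · simp [hpk]

-- the unguarded max-insert fold equals B's conditional-update fold on long runs
lemma fold_max_eq_fold_step : ∀ (l : List (String × Int)) (d : PySem.Dict String Int),
    d.keys.Nodup → (∀ kl ∈ l, 1 < kl.2) →
    l.foldl (fun runs kl => runs.insert kl.1 (max (runs.getD kl.1 0) kl.2)) d
      = l.foldl pvStepB d := by
  intro l
  induction l with
  | nil => intro d _ _; rfl
  | cons kl t ih =>
      intro d hnd hall
      have hkl : 1 < kl.2 := hall kl (by simp)
      have hstep : d.insert kl.1 (max (d.getD kl.1 0) kl.2) = pvStepB d kl := by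
        cases hg : d.get? kl.1 with
        | none =>
            have h0 : d.getD kl.1 0 = 0 := PySem.Dict.getD_of_get?_eq_none d 0 hg
            simp [pvStepB, hg, h0, show max 0 kl.2 = kl.2 by omega]
        | some v =>
            have hD : d.getD kl.1 0 = v := by
              rw [PySem.Dict.getD_eq_get?_getD, hg]; rfl
            by_cases hv : v < kl.2
            · simp [pvStepB, hg, hD, hv, show max v kl.2 = kl.2 by omega]
            · simp only [pvStepB, hg, hD, if_neg hv, show max v kl.2 = v by omega]
              exact dict_insert_self hnd hg
      rw [List.foldl_cons, List.foldl_cons, hstep]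
      refine ih (pvStepB d kl) ?_ (fun x hx => hall x (by simp [hx]))
      cases hg : d.get? kl.1 with
      | none =>
          simp only [pvStepB, hg]
          exact PySem.Dict.nodup_keys_insert d kl.1 kl.2 hnd
      | some v =>
          simp only [pvStepB, hg]
          by_cases hv : v < kl.2
          · rw [if_pos hv]; exact PySem.Dict.nodup_keys_insert d kl.1 kl.2 hnd
          · rw [if_neg hv]; exact hnd

lemma zip_adj_zero_map (t : List Int) (c : Int) :
    ((0 :: (0 :: t).map (· + c)).zip ((0 :: t).map (· + c)))
      = (0, 0 + c) :: (((0 :: t).zip t).map (Prod.map (· + c) (· + c))) := by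
  rw [List.map_cons, List.zip_cons_cons]
  congr 1
  have h : ((0 : Int) + c) :: List.map (· + c) t = List.map (· + c) (0 :: t) := by simp
  rw [h, List.zip_map]

-- KEY: the boundary pipeline reconstructs the run decomposition
lemma key_lemma : ∀ (gs : List (String × Int)), gs ≠ [] →
    (∀ kl ∈ gs, 1 ≤ kl.2) → List.IsChain (fun a b => a.1 ≠ b.1) gs →
    pvPairsAll (pvFlattenG gs) = gs := by
  intro gs
  induction gs with
  | nil => intro h; exact absurd rfl h
  | cons hd tl ih =>
      intro _ hcnt hchain
      obtain ⟨k, c⟩ := hd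
      have hc : 1 ≤ c := hcnt (k, c) (by simp)
      cases tl with
      | nil =>
          obtain ⟨m, hm⟩ : ∃ m, c.toNat = m + 1 := ⟨c.toNat - 1, by omega⟩
          have hflat : pvFlattenG [(k, c)] = List.replicate (m + 1) k := by
            simp [pvFlattenG, hm]
          rw [hflat]
          have hms : pvMseq ((List.replicate (m + 1) k).zip (List.replicate (m + 1) k).tail) 0
              = [] := mseq_all_eq _ 0 (zp_replicate_all_eq (m + 1) k)
          have hcuts : pvCutsSpec (List.replicate (m + 1) k) = [0, ((m + 1 : Nat) : Int)] := by
            unfold pvCutsSpec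
            rw [hms]
            simp
          unfold pvPairsAll
          rw [hcuts]
          have hget : PySem.List.pyGetD (List.replicate (m + 1) k) 0 "" = k := by
            rw [List.replicate_succ]
            exact PySem.List.pyGetD_zero_cons _ _ _
          have hcast : ((m + 1 : Nat) : Int) = c := by omega
          simp [List.zip_cons_cons, hget, hcast]
      | cons g2 tl2 =>
          obtain ⟨k', c'⟩ := g2
          have hc' : 1 ≤ c' := hcnt (k', c') (by simp)
          have hne : k ≠ k' := by
            have := (List.isChain_cons.mp hchain).1 (k', c') (by simp)
            simpa using this
          have hchain' := (List.isChain_cons.mp hchain).2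
          obtain ⟨m', hm'⟩ : ∃ m, c'.toNat = m + 1 := ⟨c'.toNat - 1, by omega⟩
          have hrest : pvFlattenG ((k', c') :: tl2)
              = k' :: (List.replicate m' k' ++ pvFlattenG tl2) := by
            simp [pvFlattenG, hm', List.replicate_succ]
          set rr := List.replicate m' k' ++ pvFlattenG tl2 with hrr
          set n := c.toNat with hn
          have hn1 : 1 ≤ n := by omega
          have hflat : pvFlattenG ((k, c) :: (k', c') :: tl2)
              = List.replicate n k ++ (k' :: rr) := by
            rw [show pvFlattenG ((k, c) :: (k', c') :: tl2)
                = List.replicate n k ++ pvFlattenG ((k', c') :: tl2) by simp [pvFlattenG, hn],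
              hrest]
          rw [hflat]
          -- relate the cut lists
          have hzprest : (k' :: rr).zip rr = (k' :: rr).zip (k' :: rr).tail := by rfl
          have hmid := mseq_replicate_append n hn1 k k' rr 0 hne
          have hshift : pvMseq ((k' :: rr).zip (k' :: rr).tail) ((n : Int) + 0)
              = (pvMseq ((k' :: rr).zip (k' :: rr).tail) 0).map (· + (n : Int)) :=
            mseq_shift _ 0 (n : Int)
          have hlen : ((List.replicate n k ++ k' :: rr).length : Int)
              = ((k' :: rr).length : Int) + (n : Int) := by
            simp [List.length_append, List.length_replicate]; ring
          have hcuts : pvCutsSpec (List.replicate n k ++ k' :: rr)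
              = 0 :: (pvCutsSpec (k' :: rr)).map (· + (n : Int)) := by
            unfold pvCutsSpec
            rw [hmid, hzprest]
            rw [show (0 : Int) + (n : Int) = (n : Int) + 0 by ring, hshift]
            simp only [List.map_cons, List.map_append, List.map_cons, List.map_nil,
              List.cons_append]
            rw [hlen]
            norm_num
          rw [← hflat]
          unfold pvPairsAll
          rw [hflat, hcuts]
          have hts : pvCutsSpec (k' :: rr)
              = 0 :: (pvMseq ((k' :: rr).zip (k' :: rr).tail) 0 ++ [((k' :: rr).length : Int)]) :=
            rfl
          set t := pvMseq ((k' :: rr).zip (k' :: rr).tail) 0 ++ [((k' :: rr).length : Int)]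
            with htdef
          rw [hts, List.tail_cons, zip_adj_zero_map t (n : Int), List.map_cons]
          -- head element
          have hhead : (PySem.List.pyGetD (List.replicate n k ++ k' :: rr) 0 "",
              0 + (n : Int) - 0) = (k, c) := by
            have : List.replicate n k ++ k' :: rr = k :: (List.replicate (n - 1) k ++ k' :: rr) := by
              rw [show n = (n - 1) + 1 by omega, List.replicate_succ]
              simp
            rw [this, PySem.List.pyGetD_zero_cons]
            have : 0 + (n : Int) - 0 = c := by omega
            rw [this]
          rw [hhead]
          -- tail elements
          have htail : ((((0 :: t).zip t).map (Prod.map (· + (n : Int)) (· + (n : Int)))).map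
                (fun ab => (PySem.List.pyGetD (List.replicate n k ++ k' :: rr) ab.1 "",
                  ab.2 - ab.1)))
              = ((0 :: t).zip t).map
                (fun ab => (PySem.List.pyGetD (k' :: rr) ab.1 "", ab.2 - ab.1)) := by
            rw [List.map_map]
            apply List.map_congr_left
            intro ab hab
            have hmem : ab.1 ∈ pvCutsSpec (k' :: rr) := by
              rw [hts]
              rcases ab with ⟨a, b⟩
              exact (List.of_mem_zip hab).1
            have ha : 0 ≤ ab.1 := cutsSpec_nonneg _ _ hmem
            simp only [Function.comp_apply]
            refine Prod.ext ?_ ?_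
            · exact pyGetD_shift n k (k' :: rr) ab.1 "" ha
            · show ab.2 + (n : Int) - (ab.1 + (n : Int)) = ab.2 - ab.1
              ring
          rw [htail]
          have hih := ih (by simp) (fun kl hkl => hcnt kl (by simp [hkl])) hchain'
          unfold pvPairsAll at hih
          rw [hrest, hts, List.tail_cons] at hih
          rw [hih]

-- ===== VERDICT (by name: the statement is the Claim_ definition above) =====
theorem repeated_state_runs_py_spec : Claim_equal_repeated_state_runs_py := by
  intro states _
  unfold Spec_repeated_state_runs_py
  cases states with
  | nil => rfl
  | cons x xs =>
      have hA : repeated_state_runs_py (x :: xs)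
          = ((pvGroupAcc x 1 xs).foldl pvStepMax PySem.Dict.empty).items := by
        unfold repeated_state_runs_py
        exact congrArg PySem.Dict.items (loopA_eq_groups xs PySem.Dict.empty x 1)
      have hg1 : pvFlattenG (pvGroupAcc x 1 xs) = x :: xs := by
        rw [flatten_groupAcc xs x 1 (by norm_num)]
        norm_num
      have hnempty : pvGroupAcc x 1 xs ≠ [] := by
        obtain ⟨c', t, h⟩ := head_groupAcc xs x 1
        simp [h]
      have hpairs : pvPairsAll (x :: xs) = pvGroupAcc x 1 xs := by
        rw [← hg1]
        exact key_lemma _ hnempty (counts_groupAcc xs x 1 le_rfl) (chain_groupAcc xs x 1)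
      have hB : pvPairsB (x :: xs)
          = (pvGroupAcc x 1 xs).filter (fun kl => decide (kl.2 > 1)) := by
        rw [← hpairs]
        unfold pvPairsB pvPairsAll
        rw [cutsB_eq, PySem.List.slice_from_one, List.filter_map]
        rfl
      rw [hA]
      unfold repeated_state_runs_py_alt
      rw [hB]
      have hfold : (pvGroupAcc x 1 xs).foldl pvStepMax PySem.Dict.empty
          = ((pvGroupAcc x 1 xs).filter (fun kl => decide (kl.2 > 1))).foldl
              (fun (runs : PySem.Dict String Int) (kl : String × Int) =>
                runs.insert kl.1 (max (runs.getD kl.1 0) kl.2))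
              PySem.Dict.empty := by
        show (pvGroupAcc x 1 xs).foldl
            (fun (runs : PySem.Dict String Int) (kl : String × Int) =>
              if kl.2 > 1 then runs.insert kl.1 (max (runs.getD kl.1 0) kl.2)
              else runs) PySem.Dict.empty = _
        exact PySem.List.foldl_ite_eq_foldl_filter (fun (kl : String × Int) => kl.2 > 1)
          (fun (runs : PySem.Dict String Int) (kl : String × Int) =>
            runs.insert kl.1 (max (runs.getD kl.1 0) kl.2)) _ _
      rw [hfold]
      apply congrArg PySem.Dict.items
      apply fold_max_eq_fold_step
      · simp [PySem.Dict.keys_empty]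
      · intro kl hkl
        have := List.of_mem_filter hkl
        simpa using this
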